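-- pv_equiv track=rewrite | github.com/udaychopade27/nifty-investment-assistant | app/domain/options/runtime.py | _gate_status
-- ===== SOURCE A (Python) =====
-- from typing import Optional, Dict, Any
--
-- def _gate_status(failures: list[str]) -> Dict[str, bool]:
--     failed = set(failures)
--     return {
--         "vwap_5m": "missing_5m_confirmation" not in failed and "vwap_5m_not_bullish" not in failed and "vwap_5m_not_bearish" not in failed,
--         "atm_oi_shift": "missing_atm_oi_shift" not in failed and "atm_oi_shift_invalid_for_ce" not in failed and "atm_oi_shift_invalid_for_pe" not in failed,
--         "futures_oi": "missing_futures_oi_change" not in failed and "futures_oi_not_rising" not in failed,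
--         "iv_direction": "missing_iv_change" not in failed and "iv_falling" not in failed,
--         "spread_liquidity": "missing_bid_ask_spread" not in failed and "spread_too_wide" not in failed,
--         "premium_live": "missing_option_price_for_premium" not in failed,
--         "delta_filter": "missing_option_delta" not in failed and "delta_below_min" not in failed and "delta_above_max" not in failed and "delta_rejected_below_floor" not in failed,
--         "time_window": "outside_intraday_window" not in failed,
--         "event_day": "major_event_day_block" not in failed and "major_event_window_block" not in failed,
--         "data_freshness": "stale_market_data" not in failed,
--         "circuit_breaker": all(not x.startswith("circuit_breaker:") for x in failed),
--         "liquidity_volume": "liquidity_volume_too_low" not in failed and "liquidity_volume_missing" not in failed,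
--         "market_open": "market_closed" not in failed,
--         "data_quality": "missing_data_quality_score" not in failed and "data_quality_below_threshold" not in failed,
--     }
-- ===== SOURCE B (Python) =====
-- # Inverted single pass: start with every gate True and flip gates False while
-- # scanning the failure codes once through an inverse code->gate map, instead of
-- # A's per-gate membership conjunctions over a set.
-- _ORDER = (
--     "vwap_5m", "atm_oi_shift", "futures_oi", "iv_direction", "spread_liquidity",
--     "premium_live", "delta_filter", "time_window", "event_day", "data_freshness",
--     "circuit_breaker", "liquidity_volume", "market_open", "data_quality",
-- )
-- _CODE_TO_GATE = {
--     "missing_5m_confirmation": "vwap_5m",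
--     "vwap_5m_not_bullish": "vwap_5m",
--     "vwap_5m_not_bearish": "vwap_5m",
--     "missing_atm_oi_shift": "atm_oi_shift",
--     "atm_oi_shift_invalid_for_ce": "atm_oi_shift",
--     "atm_oi_shift_invalid_for_pe": "atm_oi_shift",
--     "missing_futures_oi_change": "futures_oi",
--     "futures_oi_not_rising": "futures_oi",
--     "missing_iv_change": "iv_direction",
--     "iv_falling": "iv_direction",
--     "missing_bid_ask_spread": "spread_liquidity",
--     "spread_too_wide": "spread_liquidity",
--     "missing_option_price_for_premium": "premium_live",
--     "missing_option_delta": "delta_filter",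
--     "delta_below_min": "delta_filter",
--     "delta_above_max": "delta_filter",
--     "delta_rejected_below_floor": "delta_filter",
--     "outside_intraday_window": "time_window",
--     "major_event_day_block": "event_day",
--     "major_event_window_block": "event_day",
--     "stale_market_data": "data_freshness",
--     "liquidity_volume_too_low": "liquidity_volume",
--     "liquidity_volume_missing": "liquidity_volume",
--     "market_closed": "market_open",
--     "missing_data_quality_score": "data_quality",
--     "data_quality_below_threshold": "data_quality",
-- }
--
-- def _gate_status(failures: list[str]):
--     status = dict.fromkeys(_ORDER, True)
--     for code in failures:
--         gate = "circuit_breaker" if code.startswith("circuit_breaker:") else _CODE_TO_GATE.get(code)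
--         if gate is not None:
--             status[gate] = False
--     return status
-- ===== Notes on version B (the rewrite author's own statement) =====
-- stated objective: alternative
-- what changed: Inverts the computation: instead of A's per-gate conjunctions of membership tests over a set of failures, B starts with every gate True and makes one pass over the failure list, flipping the responsible gate False via an inverse code-to-gate map (the circuit_breaker prefix test resolves the gate inline).
import Mathlib
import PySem

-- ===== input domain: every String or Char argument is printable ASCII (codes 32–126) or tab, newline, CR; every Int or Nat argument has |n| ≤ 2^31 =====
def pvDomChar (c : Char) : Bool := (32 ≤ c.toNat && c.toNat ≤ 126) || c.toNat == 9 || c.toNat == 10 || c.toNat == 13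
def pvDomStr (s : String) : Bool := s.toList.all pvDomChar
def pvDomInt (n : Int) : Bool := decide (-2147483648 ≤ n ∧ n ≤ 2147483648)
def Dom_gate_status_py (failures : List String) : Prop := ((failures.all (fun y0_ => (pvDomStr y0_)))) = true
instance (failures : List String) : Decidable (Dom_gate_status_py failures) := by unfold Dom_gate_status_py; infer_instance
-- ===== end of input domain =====

-- B inverts A's computation: one pass over the failure list flipping gates False via an
-- inverse code->gate map, instead of A's per-gate membership conjunctions over a set
-- (objective: alternative, same cost).


-- ===== PORT A =====
def gate_status_py (failures : List String) : List (String × Bool) :=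
  let failed : PySem.Set String := PySem.Set.ofList failures
  [("vwap_5m", !(PySem.Set.contains failed "missing_5m_confirmation") && !(PySem.Set.contains failed "vwap_5m_not_bullish") && !(PySem.Set.contains failed "vwap_5m_not_bearish")),
   ("atm_oi_shift", !(PySem.Set.contains failed "missing_atm_oi_shift") && !(PySem.Set.contains failed "atm_oi_shift_invalid_for_ce") && !(PySem.Set.contains failed "atm_oi_shift_invalid_for_pe")),
   ("futures_oi", !(PySem.Set.contains failed "missing_futures_oi_change") && !(PySem.Set.contains failed "futures_oi_not_rising")),
   ("iv_direction", !(PySem.Set.contains failed "missing_iv_change") && !(PySem.Set.contains failed "iv_falling")),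
   ("spread_liquidity", !(PySem.Set.contains failed "missing_bid_ask_spread") && !(PySem.Set.contains failed "spread_too_wide")),
   ("premium_live", !(PySem.Set.contains failed "missing_option_price_for_premium")),
   ("delta_filter", !(PySem.Set.contains failed "missing_option_delta") && !(PySem.Set.contains failed "delta_below_min") && !(PySem.Set.contains failed "delta_above_max") && !(PySem.Set.contains failed "delta_rejected_below_floor")),
   ("time_window", !(PySem.Set.contains failed "outside_intraday_window")),
   ("event_day", !(PySem.Set.contains failed "major_event_day_block") && !(PySem.Set.contains failed "major_event_window_block")),
   ("data_freshness", !(PySem.Set.contains failed "stale_market_data")),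
   ("circuit_breaker", failed.all (fun x => !(PySem.Str.startswith x "circuit_breaker:"))),
   ("liquidity_volume", !(PySem.Set.contains failed "liquidity_volume_too_low") && !(PySem.Set.contains failed "liquidity_volume_missing")),
   ("market_open", !(PySem.Set.contains failed "market_closed")),
   ("data_quality", !(PySem.Set.contains failed "missing_data_quality_score") && !(PySem.Set.contains failed "data_quality_below_threshold"))]

-- ===== PORT B =====
def orderKeys : List String :=
  ["vwap_5m", "atm_oi_shift", "futures_oi", "iv_direction", "spread_liquidity",
   "premium_live", "delta_filter", "time_window", "event_day", "data_freshness",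
   "circuit_breaker", "liquidity_volume", "market_open", "data_quality"]

def codeToGate : PySem.Dict String String := PySem.Dict.mk
  [("missing_5m_confirmation", "vwap_5m"),
   ("vwap_5m_not_bullish", "vwap_5m"),
   ("vwap_5m_not_bearish", "vwap_5m"),
   ("missing_atm_oi_shift", "atm_oi_shift"),
   ("atm_oi_shift_invalid_for_ce", "atm_oi_shift"),
   ("atm_oi_shift_invalid_for_pe", "atm_oi_shift"),
   ("missing_futures_oi_change", "futures_oi"),
   ("futures_oi_not_rising", "futures_oi"),
   ("missing_iv_change", "iv_direction"),
   ("iv_falling", "iv_direction"),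
   ("missing_bid_ask_spread", "spread_liquidity"),
   ("spread_too_wide", "spread_liquidity"),
   ("missing_option_price_for_premium", "premium_live"),
   ("missing_option_delta", "delta_filter"),
   ("delta_below_min", "delta_filter"),
   ("delta_above_max", "delta_filter"),
   ("delta_rejected_below_floor", "delta_filter"),
   ("outside_intraday_window", "time_window"),
   ("major_event_day_block", "event_day"),
   ("major_event_window_block", "event_day"),
   ("stale_market_data", "data_freshness"),
   ("liquidity_volume_too_low", "liquidity_volume"),
   ("liquidity_volume_missing", "liquidity_volume"),
   ("market_closed", "market_open"),
   ("missing_data_quality_score", "data_quality"),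
   ("data_quality_below_threshold", "data_quality")]

-- the gate (if any) that failure code `code` switches off; transcribes B's inline
-- conditional + dict .get
def gateOf (code : String) : Option String :=
  if PySem.Str.startswith code "circuit_breaker:" then some "circuit_breaker"
  else PySem.Dict.get? codeToGate code

def gate_status_py_alt (failures : List String) : List (String × Bool) :=
  (failures.foldl
    (fun st code =>
      match gateOf code with
      | some g => PySem.Dict.insert st g false
      | none => st)
    (PySem.Dict.mk (orderKeys.map (fun k => (k, true))))).items

-- ===== PRECONDITION & SPEC =====
def Spec_gate_status_py (failures : List String) (out : List (String × Bool)) : Prop := out = gate_status_py_alt failures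
instance (failures : List String) (out : List (String × Bool)) : Decidable (Spec_gate_status_py failures out) := by unfold Spec_gate_status_py; infer_instance

-- ===== CLAIM (what is proved, stated in full; the proofs are below) =====
def Claim_equal_gate_status_py : Prop := ∀ (failures : List String), Dom_gate_status_py failures → Spec_gate_status_py failures (gate_status_py failures)

-- ===== LEMMAS AND PROOFS =====

-- the step function of B's loop
def stepGate (st : PySem.Dict String Bool) (code : String) : PySem.Dict String Bool :=
  match gateOf code with
  | some g => PySem.Dict.insert st g false
  | none => st

-- every gate gateOf can produce is one of the status keys
theorem gateOf_mem (c g : String) (h : gateOf c = some g) : g ∈ orderKeys := by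
  unfold gateOf at h
  split at h
  · simp at h; subst h; unfold orderKeys; simp
  · have hm := PySem.Dict.mem_items_of_get?_eq_some codeToGate h
    have hv : g ∈ codeToGate.items.map (·.2) := List.mem_map_of_mem hm
    have hsub : ∀ x ∈ codeToGate.items.map (·.2), x ∈ orderKeys := by decide
    exact hsub g hv

-- inserting False at a key of a fixed-key dict updates exactly that column
theorem insert_map_false (keys : List String) (f : String → Bool) (g : String) (hg : g ∈ keys) :
    PySem.Dict.insert (PySem.Dict.mk (keys.map (fun k => (k, f k)))) g false
      = PySem.Dict.mk (keys.map (fun k => (k, f k && !(g == k)))) := by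
  have hc : (PySem.Dict.mk (keys.map (fun k => (k, f k)))).contains g = true := by
    rw [PySem.Dict.contains_iff_mem_keys]
    simp [PySem.Dict.keys]
    exact hg
  apply PySem.Dict.ext
  rw [PySem.Dict.items_insert_of_contains _ false hc]
  simp only [List.map_map]
  apply List.map_congr_left
  intro k _
  by_cases hk : k = g
  · subst hk; simp
  · simp [Function.comp, hk, Ne.symm hk]

-- B's loop over the failures computes, per gate, "no scanned failure hits it"
theorem fold_inv (fs : List String) (f : String → Bool) :
    fs.foldl stepGate (PySem.Dict.mk (orderKeys.map (fun k => (k, f k))))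
      = PySem.Dict.mk (orderKeys.map (fun k => (k, f k && fs.all (fun c => gateOf c != some k)))) := by
  induction fs generalizing f with
  | nil => simp
  | cons c fs ih =>
      rw [List.foldl_cons]
      have hstep : stepGate (PySem.Dict.mk (orderKeys.map (fun k => (k, f k)))) c
          = PySem.Dict.mk (orderKeys.map (fun k => (k, f k && (gateOf c != some k)))) := by
        cases hg : gateOf c with
        | none =>
            simp only [stepGate, hg]
            congr 1
            apply List.map_congr_left
            intro k _
            simp
        | some g =>
            simp only [stepGate, hg]
            rw [insert_map_false orderKeys f g (gateOf_mem c g hg)]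
            congr 1
      rw [hstep, ih]
      congr 1
      apply List.map_congr_left
      intro k _
      simp [Bool.and_assoc]

-- gateOf inverted: which codes can hit a gate
theorem gateOf_inv (c g : String) (h : gateOf c = some g) :
    (PySem.Str.startswith c "circuit_breaker:" = true ∧ g = "circuit_breaker")
      ∨ (c, g) ∈ codeToGate.items := by
  unfold gateOf at h
  split at h
  · left; simp at h; exact ⟨by assumption, h.symm⟩
  · right; exact PySem.Dict.mem_items_of_get?_eq_some codeToGate h

-- "no failure hits gate g" = "none of g's disabling codes occurs", given the
-- exact characterisation of which codes hit g
theorem all_ne_some (failures : List String) (g : String) (codes : List String)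
    (hfwd : ∀ c ∈ codes, gateOf c = some g)
    (hbwd : ∀ c, gateOf c = some g → c ∈ codes) :
    failures.all (fun c => gateOf c != some g) = codes.all (fun a => !decide (a ∈ failures)) := by
  rw [Bool.eq_iff_iff]
  simp only [List.all_eq_true, bne_iff_ne, ne_eq, Bool.not_eq_eq_eq_not, Bool.not_true,
    decide_eq_false_iff_not]
  constructor
  · intro h a ha hf
    exact h a hf (hfwd a ha)
  · intro h c hc hg
    exact h c (hbwd c hg) hc

-- the circuit_breaker gate: hit exactly by codes with the prefix
theorem gateOf_cb_iff (c : String) :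
    gateOf c = some "circuit_breaker" ↔ PySem.Str.startswith c "circuit_breaker:" = true := by
  constructor
  · intro h
    rcases gateOf_inv c _ h with ⟨hs, _⟩ | hm
    · exact hs
    · unfold codeToGate at hm; simp at hm
  · intro h; unfold gateOf; rw [if_pos h]

theorem all_ne_cb (failures : List String) :
    failures.all (fun c => gateOf c != some "circuit_breaker")
      = failures.all (fun x => !(PySem.Str.startswith x "circuit_breaker:")) := by
  apply List.all_congr rfl
  intro c
  rw [Bool.eq_iff_iff]
  simp [bne_iff_ne, gateOf_cb_iff]

-- 'all' over set(xs) equals 'all' over xs (set dedup preserves membership)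
theorem pv_all_ofList (xs : List String) (f : String → Bool) :
    (PySem.Set.ofList xs).all f = xs.all f := by
  rw [Bool.eq_iff_iff]
  simp [List.all_eq_true, PySem.Set.mem_ofList]

-- ===== VERDICT (by name: the statement is the Claim_ definition above) =====
theorem gate_status_py_spec : Claim_equal_gate_status_py := by
  intro failures _
  unfold Spec_gate_status_py gate_status_py gate_status_py_alt
  have hfold := fold_inv failures (fun _ => true)
  rw [show PySem.Dict.mk (orderKeys.map fun k => (k, true))
        = PySem.Dict.mk (orderKeys.map fun k => (k, (fun _ : String => true) k)) from rfl] at *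
  show _ = (failures.foldl stepGate _).items
  rw [hfold]
  unfold orderKeys
  simp only [List.map_cons, List.map_nil, Bool.true_and]
  have hent : ∀ (g : String) (codes : List String),
      (∀ c ∈ codes, gateOf c = some g) → (∀ c, gateOf c = some g → c ∈ codes) →
      failures.all (fun c => gateOf c != some g) = codes.all (fun a => !decide (a ∈ failures)) :=
    fun g codes => all_ne_some failures g codes
  rw [hent "vwap_5m" ["missing_5m_confirmation", "vwap_5m_not_bullish", "vwap_5m_not_bearish"]
        (by decide) (by intro c h; rcases gateOf_inv c _ h with ⟨_, h2⟩ | hm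
                        · simp at h2
                        · unfold codeToGate at hm; simp_all),
      hent "atm_oi_shift" ["missing_atm_oi_shift", "atm_oi_shift_invalid_for_ce", "atm_oi_shift_invalid_for_pe"]
        (by decide) (by intro c h; rcases gateOf_inv c _ h with ⟨_, h2⟩ | hm
                        · simp at h2
                        · unfold codeToGate at hm; simp_all),
      hent "futures_oi" ["missing_futures_oi_change", "futures_oi_not_rising"]
        (by decide) (by intro c h; rcases gateOf_inv c _ h with ⟨_, h2⟩ | hm
                        · simp at h2
                        · unfold codeToGate at hm; simp_all),
      hent "iv_direction" ["missing_iv_change", "iv_falling"]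
        (by decide) (by intro c h; rcases gateOf_inv c _ h with ⟨_, h2⟩ | hm
                        · simp at h2
                        · unfold codeToGate at hm; simp_all),
      hent "spread_liquidity" ["missing_bid_ask_spread", "spread_too_wide"]
        (by decide) (by intro c h; rcases gateOf_inv c _ h with ⟨_, h2⟩ | hm
                        · simp at h2
                        · unfold codeToGate at hm; simp_all),
      hent "premium_live" ["missing_option_price_for_premium"]
        (by decide) (by intro c h; rcases gateOf_inv c _ h with ⟨_, h2⟩ | hm
                        · simp at h2
                        · unfold codeToGate at hm; simp_all),
      hent "delta_filter" ["missing_option_delta", "delta_below_min", "delta_above_max", "delta_rejected_below_floor"]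
        (by decide) (by intro c h; rcases gateOf_inv c _ h with ⟨_, h2⟩ | hm
                        · simp at h2
                        · unfold codeToGate at hm; simp_all),
      hent "time_window" ["outside_intraday_window"]
        (by decide) (by intro c h; rcases gateOf_inv c _ h with ⟨_, h2⟩ | hm
                        · simp at h2
                        · unfold codeToGate at hm; simp_all),
      hent "event_day" ["major_event_day_block", "major_event_window_block"]
        (by decide) (by intro c h; rcases gateOf_inv c _ h with ⟨_, h2⟩ | hm
                        · simp at h2
                        · unfold codeToGate at hm; simp_all),
      hent "data_freshness" ["stale_market_data"]
        (by decide) (by intro c h; rcases gateOf_inv c _ h with ⟨_, h2⟩ | hm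
                        · simp at h2
                        · unfold codeToGate at hm; simp_all),
      hent "liquidity_volume" ["liquidity_volume_too_low", "liquidity_volume_missing"]
        (by decide) (by intro c h; rcases gateOf_inv c _ h with ⟨_, h2⟩ | hm
                        · simp at h2
                        · unfold codeToGate at hm; simp_all),
      hent "market_open" ["market_closed"]
        (by decide) (by intro c h; rcases gateOf_inv c _ h with ⟨_, h2⟩ | hm
                        · simp at h2
                        · unfold codeToGate at hm; simp_all),
      hent "data_quality" ["missing_data_quality_score", "data_quality_below_threshold"]
        (by decide) (by intro c h; rcases gateOf_inv c _ h with ⟨_, h2⟩ | hm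
                        · simp at h2
                        · unfold codeToGate at hm; simp_all),
      all_ne_cb failures, pv_all_ofList]
  simp [Bool.and_assoc]
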